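-- pv_equiv track=rewrite | github.com/ZzzhHe/my_ugit | ugit/diff.py | iter_change_files
-- ===== SOURCE A (Python) =====
-- from collections import defaultdict
--
-- def compare_trees(*trees):
--     """
--     take a list of trees(*trees)
--     :return: trees grouped by filename
--     for example, {dog.txt:[dog_oid_1, dog_oid_2], cat.txt:[cat_oid_1, cat_oid_2]}
--     different oids from different commits
--     """
--     # defaultdict is dict with default value
--     # default value:  a number of lists
--     #                       v
--     entries = defaultdict(lambda: [None] * len(trees))
--     for i, tree in enumerate(trees):
--         for path, oid in tree.items():
--             entries[path][i] = oid
--     for path, oids in entries.items():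
--         yield (path, *oids)
--
-- def iter_change_files(t_from, t_to):
--     """
--     take two trees and output all changed paths along with the change type
--     (deleted, created, modified)
--     """
--     for path, o_from, o_to in compare_trees(t_from, t_to):
--         if o_from != o_to:
--             action = (
--                 'new file' if not o_from else
--                 'deleted' if not o_to else
--                 'modified'
--             )
--             yield path, action
-- ===== SOURCE B (Python) =====
-- def iter_change_files(t_from, t_to):
--     for path, o_from in t_from.items():
--         o_to = t_to.get(path)
--         if o_from != o_to:
--             yield path, ('new file' if not o_from else
--                          'deleted' if not o_to else
--                          'modified')
--     for path, o_to in t_to.items():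
--         if path not in t_from:
--             yield path, 'new file'
-- ===== Notes on version B (the rewrite author's own statement) =====
-- stated objective: simpler
-- what changed: Drops the compare_trees merge (defaultdict of [o_from, o_to] slot lists filled by two indexed passes and then re-scanned) and yields the diff directly in two plain passes: over t_from classifying each path against t_to.get(path), then over t_to yielding the paths absent from t_from as new files, preserving the original yield order.
import Mathlib
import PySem

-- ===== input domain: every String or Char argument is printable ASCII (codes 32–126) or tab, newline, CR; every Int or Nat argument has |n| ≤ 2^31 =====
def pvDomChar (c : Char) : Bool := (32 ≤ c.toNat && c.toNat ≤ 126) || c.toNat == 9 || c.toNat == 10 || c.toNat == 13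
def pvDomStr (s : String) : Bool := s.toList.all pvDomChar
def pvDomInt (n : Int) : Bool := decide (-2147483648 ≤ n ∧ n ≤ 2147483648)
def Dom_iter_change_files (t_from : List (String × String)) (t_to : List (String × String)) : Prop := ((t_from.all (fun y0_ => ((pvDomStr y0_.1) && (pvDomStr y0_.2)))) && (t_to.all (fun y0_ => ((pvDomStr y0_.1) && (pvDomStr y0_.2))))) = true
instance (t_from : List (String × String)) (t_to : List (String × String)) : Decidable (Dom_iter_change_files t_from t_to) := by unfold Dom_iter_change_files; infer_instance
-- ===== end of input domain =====

-- B drops the compare_trees merge dict and yields the diff in two direct passes (t_from first, then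
-- t_to-only paths); objective: simpler. Both versions only read their arguments (no mutation).

-- ===== PORT A =====
-- Python truthiness of `o` where o is None or a str: `not o` is true iff None or "".
def pvFalsy : Option String → Bool
  | none => true
  | some s => s == ""

-- compare_trees(t_from, t_to): defaultdict path ↦ [o_from, o_to], filled by two enumerate passes,
-- then yielded as (path, o_from, o_to) in insertion order.
def compareTrees (t_from : List (String × String)) (t_to : List (String × String)) :
    List (String × (Option String × Option String)) :=
  let entries := t_from.foldl
    (fun d pr => d.insert pr.1 (some pr.2, (d.getD pr.1 (none, none)).2)) PySem.Dict.empty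
  let entries := t_to.foldl
    (fun d pr => d.insert pr.1 ((d.getD pr.1 (none, none)).1, some pr.2)) entries
  entries.items

def iter_change_files (t_from : List (String × String)) (t_to : List (String × String)) : List (String × String) :=
  (compareTrees t_from t_to).foldl
    (fun acc e =>
      if e.2.1 ≠ e.2.2 then
        acc ++ [(e.1,
          if pvFalsy e.2.1 then "new file"
          else if pvFalsy e.2.2 then "deleted"
          else "modified")]
      else acc) []

-- ===== PORT B =====
def iter_change_files_alt (t_from : List (String × String)) (t_to : List (String × String)) : List (String × String) :=
  let dFrom := PySem.Dict.ofList t_from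
  let dTo := PySem.Dict.ofList t_to
  let out := t_from.foldl
    (fun acc pr =>
      let oTo := dTo.get? pr.1
      if some pr.2 ≠ oTo then
        acc ++ [(pr.1,
          if pr.2 == "" then "new file"
          else if pvFalsy oTo then "deleted"
          else "modified")]
      else acc) []
  t_to.foldl
    (fun acc pr => if !dFrom.contains pr.1 then acc ++ [(pr.1, "new file")] else acc) out

-- ===== PRECONDITION & SPEC =====
-- Pre_ excludes association lists with duplicate keys: they do not represent Python dicts (A's
-- arguments are dicts, so every real call has distinct keys per tree).
def Pre_iter_change_files (t_from : List (String × String)) (t_to : List (String × String)) : Prop :=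
  (t_from.map Prod.fst).Nodup ∧ (t_to.map Prod.fst).Nodup
instance (t_from : List (String × String)) (t_to : List (String × String)) : Decidable (Pre_iter_change_files t_from t_to) := by unfold Pre_iter_change_files; infer_instance

def pvWitness_iter_change_files : (List (String × String)) × (List (String × String)) :=
  ([("a", "1"), ("b", "2")], [("a", "1"), ("c", "3")])

def Spec_iter_change_files (t_from : List (String × String)) (t_to : List (String × String)) (out : List (String × String)) : Prop := out = iter_change_files_alt t_from t_to
instance (t_from : List (String × String)) (t_to : List (String × String)) (out : List (String × String)) : Decidable (Spec_iter_change_files t_from t_to out) := by unfold Spec_iter_change_files; infer_instance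

-- ===== CLAIM (what is proved, stated in full; the proofs are below) =====
def Claim_equal_iter_change_files : Prop := ∀ (t_from : List (String × String)) (t_to : List (String × String)), Dom_iter_change_files t_from t_to → Pre_iter_change_files t_from t_to → Spec_iter_change_files t_from t_to (iter_change_files t_from t_to)

-- ===== LEMMAS AND PROOFS =====

-- A dict built from a nodup-keyed pair list is that list verbatim.
lemma dict_ofList_eq_mk {ν : Type} (l : List (String × ν)) (h : (l.map Prod.fst).Nodup) :
    PySem.Dict.ofList l = PySem.Dict.mk l := by
  apply PySem.Dict.ext
  show (l.foldl (fun d p => d.insert p.1 p.2) PySem.Dict.empty).items = l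
  have h2 := PySem.Dict.items_foldl_insert_fresh l Prod.fst Prod.snd PySem.Dict.empty
      (fun a _ => PySem.Dict.contains_empty a.1) h
  simpa using h2

-- First pass of compare_trees over fresh keys: appends (path, (some oid, none)) in order.
lemma items_pass1 (l : List (String × String)) (d : PySem.Dict String (Option String × Option String))
    (hfresh : ∀ pr ∈ l, d.contains pr.1 = false) (h : (l.map Prod.fst).Nodup) :
    (l.foldl (fun d pr => d.insert pr.1 (some pr.2, (d.getD pr.1 (none, none)).2)) d).items
      = d.items ++ l.map (fun pr => (pr.1, ((some pr.2 : Option String), (none : Option String)))) := by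
  induction l generalizing d with
  | nil => simp
  | cons pr rest ih =>
    have hc : d.contains pr.1 = false := hfresh pr (by simp)
    have hhead : pr.1 ∉ rest.map Prod.fst := by
      have := h; simp only [List.map_cons, List.nodup_cons] at this; exact this.1
    simp only [List.foldl_cons, List.map_cons]
    rw [PySem.Dict.getD_of_not_contains d _ hc]
    rw [ih (d.insert pr.1 (some pr.2, none))
        (by
          intro q hq
          rw [PySem.Dict.contains_insert]
          have hne : (q.1 == pr.1) = false := by
            simp only [beq_eq_false_iff_ne, ne_eq]
            intro hq1
            exact hhead (hq1 ▸ List.mem_map_of_mem hq)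
          simp [hne, hfresh q (List.mem_cons_of_mem _ hq)])
        (by
          have := h; simp only [List.map_cons, List.nodup_cons] at this; exact this.2)]
    rw [PySem.Dict.items_insert_of_not_contains d _ hc]
    simp

-- Second pass: existing rows get their second slot from the (nodup) list l, rows for fresh keys append.
lemma items_pass2 (l : List (String × String)) (d : PySem.Dict String (Option String × Option String))
    (hd : d.keys.Nodup) (hl : (l.map Prod.fst).Nodup) :
    (l.foldl (fun d pr => d.insert pr.1 ((d.getD pr.1 (none, none)).1, some pr.2)) d).items
      = d.items.map (fun q => (q.1, (q.2.1, Option.or ((PySem.Dict.mk l).get? q.1) q.2.2)))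
        ++ (l.filter (fun pr => !d.contains pr.1)).map
             (fun pr => (pr.1, ((none : Option String), (some pr.2 : Option String)))) := by
  induction l generalizing d with
  | nil =>
    simp only [List.foldl_nil, List.filter_nil, List.map_nil, List.append_nil]
    have : ∀ q : String × (Option String × Option String),
        (q.1, (q.2.1, Option.or ((PySem.Dict.mk ([] : List (String × String))).get? q.1) q.2.2)) = q := by
      intro q
      have : (PySem.Dict.mk ([] : List (String × String))).get? q.1 = none := by
        rw [PySem.Dict.get?_eq_none_iff_not_mem_keys]; simp
      simp [this]
    simp [this]
  | cons pr rest ih =>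
    have hhead : pr.1 ∉ rest.map Prod.fst := by
      have := hl; simp only [List.map_cons, List.nodup_cons] at this; exact this.1
    have htail : (rest.map Prod.fst).Nodup := by
      have := hl; simp only [List.map_cons, List.nodup_cons] at this; exact this.2
    have hrest_none : (PySem.Dict.mk rest).get? pr.1 = none := by
      rw [PySem.Dict.get?_eq_none_iff_not_mem_keys]
      simpa using hhead
    simp only [List.foldl_cons]
    by_cases hc : d.contains pr.1 = true
    · rw [ih _ (PySem.Dict.nodup_keys_insert _ _ _ hd) htail]
      rw [PySem.Dict.items_insert_of_contains d _ hc, List.map_map]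
      have hpart2 : rest.filter
            (fun q => !(d.insert pr.1 ((d.getD pr.1 (none, none)).1, some pr.2)).contains q.1)
          = rest.filter (fun q => !d.contains q.1) := by
        apply List.filter_congr
        intro q hq
        rw [PySem.Dict.contains_insert]
        have : (q.1 == pr.1) = false := by
          simp only [beq_eq_false_iff_ne, ne_eq]
          intro h1; exact hhead (h1 ▸ List.mem_map_of_mem hq)
        simp [this]
      have hpart1 : d.items.map
            ((fun q => (q.1, (q.2.1, Option.or ((PySem.Dict.mk rest).get? q.1) q.2.2))) ∘
              (fun p => if (p.1 == pr.1) = true then (pr.1, ((d.getD pr.1 (none, none)).1, some pr.2)) else p))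
          = d.items.map
            (fun q => (q.1, (q.2.1, Option.or ((PySem.Dict.mk (pr :: rest)).get? q.1) q.2.2))) := by
        apply List.map_congr_left
        intro q hq
        by_cases h1 : q.1 = pr.1
        · have hget : d.getD pr.1 (none, none) = q.2 := by
            apply PySem.Dict.getD_of_mem_items d _ hd
            rw [← h1]; simpa using hq
          simp only [Function.comp, h1, beq_self_eq_true, if_true, hget]
          rw [PySem.Dict.get?_mk_cons, hrest_none]
          simp
        · have hb : (q.1 == pr.1) = false := by simpa using h1
          simp only [Function.comp, hb]
          rw [PySem.Dict.get?_mk_cons]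
          simp [Ne.symm h1]
      rw [hpart1, hpart2]
      have : (pr :: rest).filter (fun q => !d.contains q.1)
          = rest.filter (fun q => !d.contains q.1) := by
        simp [hc]
      rw [this]
    · have hc' : d.contains pr.1 = false := by simpa using hc
      rw [PySem.Dict.getD_of_not_contains d _ hc']
      rw [ih _ (PySem.Dict.nodup_keys_insert _ _ _ hd) htail]
      rw [PySem.Dict.items_insert_of_not_contains d _ hc']
      have hkey : pr.1 ∉ d.keys := by
        rw [PySem.Dict.contains_eq_decide_mem_keys] at hc'
        simpa using hc'
      have hpart2 : rest.filter
            (fun q => !(d.insert pr.1 ((none : Option String), some pr.2)).contains q.1)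
          = rest.filter (fun q => !d.contains q.1) := by
        apply List.filter_congr
        intro q hq
        rw [PySem.Dict.contains_insert]
        have : (q.1 == pr.1) = false := by
          simp only [beq_eq_false_iff_ne, ne_eq]
          intro h1; exact hhead (h1 ▸ List.mem_map_of_mem hq)
        simp [this]
      have hpart1 : d.items.map
            (fun q => (q.1, (q.2.1, Option.or ((PySem.Dict.mk rest).get? q.1) q.2.2)))
          = d.items.map
            (fun q => (q.1, (q.2.1, Option.or ((PySem.Dict.mk (pr :: rest)).get? q.1) q.2.2))) := by
        apply List.map_congr_left
        intro q hq
        have h1 : q.1 ≠ pr.1 := by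
          intro h1; exact hkey (h1 ▸ PySem.Dict.mem_keys_of_mem_items d hq)
        rw [PySem.Dict.get?_mk_cons]
        simp [Ne.symm h1]
      rw [hpart2, ← hpart1]
      have hnew : (fun q : String × (Option String × Option String) =>
            (q.1, (q.2.1, Option.or ((PySem.Dict.mk rest).get? q.1) q.2.2)))
            (pr.1, ((none : Option String), some pr.2))
          = (pr.1, ((none : Option String), (some pr.2 : Option String))) := by
        simp [hrest_none]
      have hfilt : (pr :: rest).filter (fun q => !d.contains q.1)
          = pr :: rest.filter (fun q => !d.contains q.1) := by
        simp [hc']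
      rw [hfilt]
      simp only [List.map_append, List.map_cons, List.map_nil, hnew]
      simp

-- ===== VERDICT (by name: the statement is the Claim_ definition above) =====
theorem iter_change_files_spec : Claim_equal_iter_change_files := by
  intro t_from t_to _ hpre
  obtain ⟨h1, h2⟩ := hpre
  show iter_change_files t_from t_to = iter_change_files_alt t_from t_to
  have e1items : (t_from.foldl
      (fun d pr => d.insert pr.1 (some pr.2, (d.getD pr.1 (none, none)).2)) PySem.Dict.empty).items
      = t_from.map (fun pr => (pr.1, ((some pr.2 : Option String), (none : Option String)))) := by
    rw [items_pass1 t_from PySem.Dict.empty (fun pr _ => PySem.Dict.contains_empty pr.1) h1]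
    show [] ++ _ = _
    simp
  have hkeys : (t_from.foldl
      (fun (d : PySem.Dict String (Option String × Option String)) pr =>
        d.insert pr.1 (some pr.2, (d.getD pr.1 (none, none)).2)) PySem.Dict.empty).keys
      = t_from.map Prod.fst := by
    simp only [PySem.Dict.keys, e1items, List.map_map]
    rfl
  have e2items := items_pass2 t_to _ (hkeys ▸ h1) h2
  rw [e1items] at e2items
  simp only [iter_change_files, iter_change_files_alt, compareTrees, e2items]
  rw [dict_ofList_eq_mk t_from h1, dict_ofList_eq_mk t_to h2]
  rw [PySem.List.foldl_append_ite, PySem.List.foldl_append_ite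
      (p := fun pr : String × String => some pr.2 ≠ (PySem.Dict.mk t_to).get? pr.1),
      PySem.List.foldl_append_if]
  rw [List.filter_append, List.map_append, List.map_map, List.filter_map, List.map_map,
      List.filter_map, List.map_map]
  simp only [List.nil_append]
  congr 1
  · simp [Function.comp_def, Option.or_none, pvFalsy]
  · simp only [Function.comp_def, pvFalsy, List.filter_filter]
    rw [List.filter_congr (q := fun pr : String × String => !(PySem.Dict.mk t_from).contains pr.1) ?_]
    · simp
    · intro pr _
      simp [PySem.Dict.contains_eq_decide_mem_keys, hkeys]
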